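-- pv_equiv track=rewrite | github.com/b-erdem/rekit | src/rekit/jsbundle/decompiler.py | try_beautify
-- ===== SOURCE A (Python) =====
-- def try_beautify(content: str) -> str:
--     """Basic JS beautification for minified code.
--
--     Not a full beautifier -- just adds newlines and simple indentation
--     to make the code grep-friendly.
--     """
--     result: list[str] = []
--     indent = 0
--     i = 0
--     line_buf: list[str] = []
--
--     while i < len(content):
--         ch = content[i]
--
--         # Handle string literals -- don't break inside them
--         if ch in ('"', "'", "`"):
--             quote = ch
--             line_buf.append(ch)
--             i += 1
--             while i < len(content) and content[i] != quote:
--                 if content[i] == "\\" and i + 1 < len(content):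
--                     line_buf.append(content[i])
--                     i += 1
--                 line_buf.append(content[i])
--                 i += 1
--             if i < len(content):
--                 line_buf.append(content[i])
--                 i += 1
--             continue
--
--         if ch == "{":
--             line_buf.append(ch)
--             result.append("  " * indent + "".join(line_buf).strip())
--             line_buf = []
--             indent += 1
--             i += 1
--             continue
--
--         if ch == "}":
--             if line_buf and "".join(line_buf).strip():
--                 result.append("  " * indent + "".join(line_buf).strip())
--                 line_buf = []
--             indent = max(0, indent - 1)
--             result.append("  " * indent + "}")
--             i += 1
--             continue
--
--         if ch == ";":
--             line_buf.append(ch)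
--             result.append("  " * indent + "".join(line_buf).strip())
--             line_buf = []
--             i += 1
--             continue
--
--         if ch == "\n":
--             if line_buf and "".join(line_buf).strip():
--                 result.append("  " * indent + "".join(line_buf).strip())
--                 line_buf = []
--             i += 1
--             continue
--
--         line_buf.append(ch)
--         i += 1
--
--     # Flush remaining
--     if line_buf and "".join(line_buf).strip():
--         result.append("  " * indent + "".join(line_buf).strip())
--
--     return "\n".join(result)
-- ===== SOURCE B (Python) =====
-- def _segments(content):
--     """Pass 1: split content into (text, terminator) events by folding over the
--     characters with an explicit in-string state (quote char + escape flag)."""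
--     events = []
--     buf = []
--     quote = None
--     escaped = False
--     for ch in content:
--         if quote is not None:
--             buf.append(ch)
--             if escaped:
--                 escaped = False
--             elif ch == "\\":
--                 escaped = True
--             elif ch == quote:
--                 quote = None
--         elif ch in "\"'`":
--             buf.append(ch)
--             quote = ch
--         elif ch in "{};\n":
--             events.append(("".join(buf), ch))
--             buf = []
--         else:
--             buf.append(ch)
--     events.append(("".join(buf), None))
--     return events
--
--
-- def _event_lines(text, term, indent):
--     """Lines produced by one event at the given indent level."""
--     if term == "{" or term == ";":
--         return ["  " * indent + (text + term).strip()]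
--     stripped = text.strip()
--     lines = ["  " * indent + stripped] if stripped else []
--     if term == "}":
--         lines.append("  " * max(0, indent - 1) + "}")
--     return lines
--
--
-- def try_beautify(content: str) -> str:
--     """Basic JS beautification for minified code (tokenize, then indent)."""
--     lines = []
--     indent = 0
--     for text, term in _segments(content):
--         lines += _event_lines(text, term, indent)
--         if term == "{":
--             indent += 1
--         elif term == "}":
--             indent = max(0, indent - 1)
--     return "\n".join(lines)
-- ===== Notes on version B (the rewrite author's own statement) =====
-- stated objective: alternative
-- what changed: A is one interleaved index-driven state machine with a nested while-loop for string literals, building each line char-by-char while tracking indentation; B separates the work into two passes: a character fold carrying an explicit in-string state (quote + escape flag) that emits (text, terminator) events, then a fold of the indentation rules over the events via a per-event line-generator helper.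
import Mathlib
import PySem

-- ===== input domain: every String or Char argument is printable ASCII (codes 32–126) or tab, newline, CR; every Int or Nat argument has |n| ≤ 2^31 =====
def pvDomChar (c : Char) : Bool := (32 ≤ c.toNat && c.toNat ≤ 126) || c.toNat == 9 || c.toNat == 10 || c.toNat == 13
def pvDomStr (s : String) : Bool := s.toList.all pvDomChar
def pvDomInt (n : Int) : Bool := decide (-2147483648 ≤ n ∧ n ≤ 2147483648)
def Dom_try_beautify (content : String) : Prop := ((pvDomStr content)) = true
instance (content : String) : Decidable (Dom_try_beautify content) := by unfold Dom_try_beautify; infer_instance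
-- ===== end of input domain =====

-- B replaces A's single interleaved index-driven state machine (with a nested while-loop
-- for string literals) by a character fold carrying an explicit in-string state that emits
-- (text, terminator) events, followed by a fold of the indentation rules over the events;
-- objective: alternative decomposition, same O(n) cost.

-- Python's "  " * indent (used by both sources)
def pvIndent (indent : Int) : List Char := PySem.List.pyRepeat "  ".toList indent

-- ===== PORT A =====

-- inner `while` of A: scan a string literal (escapes handled), consuming from index i.
-- The fuel parameter only makes the recursion structural; with fuel > content.length - i
-- (as every call below supplies) the fuel-exhaustion branch is unreachable.
def pvInnerA (fuel : Nat) (content : List Char) (quote : Char) (buf : List Char) (i : Nat) :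
    List Char × Nat :=
  match fuel with
  | 0 => (buf, i)
  | fuel + 1 =>
    if i < content.length ∧ content.getD i ' ' ≠ quote then
      if content.getD i ' ' = '\\' ∧ i + 1 < content.length then
        pvInnerA fuel content quote (buf ++ [content.getD i ' ', content.getD (i + 1) ' ']) (i + 2)
      else
        pvInnerA fuel content quote (buf ++ [content.getD i ' ']) (i + 1)
    else if i < content.length then
      (buf ++ [content.getD i ' '], i + 1)
    else (buf, i)

-- main `while` of A: one interleaved state machine over result / indent / line buffer
def pvMainA (fuel : Nat) (content : List Char) (result : List (List Char)) (indent : Int)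
    (buf : List Char) (i : Nat) : List (List Char) :=
  match fuel with
  | 0 => result
  | fuel + 1 =>
    if i < content.length then
      if content.getD i ' ' = '"' ∨ content.getD i ' ' = '\'' ∨ content.getD i ' ' = '`' then
        pvMainA fuel content result indent
          (pvInnerA (content.length + 1) content (content.getD i ' ')
            (buf ++ [content.getD i ' ']) (i + 1)).1
          (pvInnerA (content.length + 1) content (content.getD i ' ')
            (buf ++ [content.getD i ' ']) (i + 1)).2
      else if content.getD i ' ' = '{' then
        pvMainA fuel content (result ++ [pvIndent indent ++ PySem.Chars.strip (buf ++ [content.getD i ' '])])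
          (indent + 1) [] (i + 1)
      else if content.getD i ' ' = '}' then
        pvMainA fuel content
          ((if buf ≠ [] ∧ PySem.Chars.strip buf ≠ [] then
              result ++ [pvIndent indent ++ PySem.Chars.strip buf] else result)
            ++ [pvIndent (max 0 (indent - 1)) ++ ['}']])
          (max 0 (indent - 1)) [] (i + 1)
      else if content.getD i ' ' = ';' then
        pvMainA fuel content (result ++ [pvIndent indent ++ PySem.Chars.strip (buf ++ [content.getD i ' '])])
          indent [] (i + 1)
      else if content.getD i ' ' = '\n' then
        pvMainA fuel content
          (if buf ≠ [] ∧ PySem.Chars.strip buf ≠ [] then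
              result ++ [pvIndent indent ++ PySem.Chars.strip buf] else result)
          indent [] (i + 1)
      else
        pvMainA fuel content result indent (buf ++ [content.getD i ' ']) (i + 1)
    else
      if buf ≠ [] ∧ PySem.Chars.strip buf ≠ [] then
        result ++ [pvIndent indent ++ PySem.Chars.strip buf] else result

def try_beautify (content : String) : String :=
  String.ofList (PySem.Chars.join ['\n']
    (pvMainA (content.toList.length + 1) content.toList [] 0 [] 0))

-- ===== PORT B =====

-- B's _segments loop body: one character of the fold; state = (events, buf, in-string mode)
def pvSegStep (st : List (List Char × Option Char) × List Char × Option (Char × Bool))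
    (ch : Char) : List (List Char × Option Char) × List Char × Option (Char × Bool) :=
  match st with
  | (evs, buf, some (q, esc)) =>
    (evs, buf ++ [ch],
      if esc then some (q, false)
      else if ch = '\\' then some (q, true)
      else if ch = q then none
      else some (q, false))
  | (evs, buf, none) =>
    if ch = '"' ∨ ch = '\'' ∨ ch = '`' then (evs, buf ++ [ch], some (ch, false))
    else if ch = '{' ∨ ch = '}' ∨ ch = ';' ∨ ch = '\n' then (evs ++ [(buf, some ch)], [], none)
    else (evs, buf ++ [ch], none)

-- B's _segments: fold over the characters, then flush the final buffer as the EOF event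
def pvSegments (content : List Char) : List (List Char × Option Char) :=
  (content.foldl pvSegStep ([], [], none)).1
    ++ [((content.foldl pvSegStep ([], [], none)).2.1, none)]

-- B's _event_lines helper
def pvEventLines (text : List Char) (term : Option Char) (indent : Int) : List (List Char) :=
  if term = some '{' ∨ term = some ';' then
    [pvIndent indent ++ PySem.Chars.strip (text ++ [term.getD ' '])]
  else
    (if PySem.Chars.strip text ≠ [] then [pvIndent indent ++ PySem.Chars.strip text] else [])
      ++ (if term = some '}' then [pvIndent (max 0 (indent - 1)) ++ ['}']] else [])

-- B's second pass: body of the `for text, term in _segments(...)` loop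
def pvStepB (acc : List (List Char) × Int) (ev : List Char × Option Char) :
    List (List Char) × Int :=
  (acc.1 ++ pvEventLines ev.1 ev.2 acc.2,
   if ev.2 = some '{' then acc.2 + 1
   else if ev.2 = some '}' then max 0 (acc.2 - 1)
   else acc.2)

def try_beautify_alt (content : String) : String :=
  String.ofList (PySem.Chars.join ['\n']
    ((pvSegments content.toList).foldl pvStepB ([], 0)).1)

-- ===== PRECONDITION & SPEC =====
def Spec_try_beautify (content : String) (out : String) : Prop := out = try_beautify_alt content
instance (content : String) (out : String) : Decidable (Spec_try_beautify content out) := by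
  unfold Spec_try_beautify; infer_instance

-- ===== CLAIM (what is proved, stated in full; the proofs are below) =====
def Claim_equal_try_beautify : Prop :=
  ∀ (content : String), Dom_try_beautify content → Spec_try_beautify content (try_beautify content)

-- ===== LEMMAS AND PROOFS =====

theorem pv_getD_lt (l : List Char) (i : Nat) (h : i < l.length) : l.getD i ' ' = l[i] := by
  simp [List.getD_eq_getElem?_getD, List.getElem?_eq_getElem h]

theorem pv_strip_nil : PySem.Chars.strip ([] : List Char) = [] := by
  simp [PySem.Chars.strip, PySem.Chars.lstrip, PySem.Chars.rstrip]

-- A's "line_buf and strip(...)" flush equals B's "if stripped" line list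
theorem pv_flush_eq (r : List (List Char)) (buf x : List Char) :
    (if buf ≠ [] ∧ PySem.Chars.strip buf ≠ [] then r ++ [x] else r)
      = r ++ (if PySem.Chars.strip buf ≠ [] then [x] else []) := by
  by_cases hb : buf = []
  · subst hb; simp [pv_strip_nil]
  · by_cases hs : PySem.Chars.strip buf = [] <;> simp [hb, hs]

theorem pvInnerA_ge : ∀ (fuel : Nat) (c : List Char) (q : Char) (b : List Char) (j : Nat),
    j ≤ (pvInnerA fuel c q b j).2 := by
  intro fuel
  induction fuel with
  | zero => intro c q b j; exact Nat.le_refl j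
  | succ fuel ih =>
    intro c q b j
    simp only [pvInnerA]
    by_cases h : j < c.length ∧ c.getD j ' ' ≠ q
    · rw [if_pos h]
      by_cases hesc : c.getD j ' ' = '\\' ∧ j + 1 < c.length
      · rw [if_pos hesc]
        have := ih c q (b ++ [c.getD j ' ', c.getD (j + 1) ' ']) (j + 2)
        omega
      · rw [if_neg hesc]
        have := ih c q (b ++ [c.getD j ' ']) (j + 1)
        omega
    · rw [if_neg h]
      by_cases hn : j < c.length
      · rw [if_pos hn]; exact Nat.le_succ j
      · rw [if_neg hn]

theorem pvInnerA_le : ∀ (fuel : Nat) (c : List Char) (q : Char) (b : List Char) (j : Nat),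
    j ≤ c.length → (pvInnerA fuel c q b j).2 ≤ c.length := by
  intro fuel
  induction fuel with
  | zero => intro c q b j hj; exact hj
  | succ fuel ih =>
    intro c q b j hj
    simp only [pvInnerA]
    by_cases h : j < c.length ∧ c.getD j ' ' ≠ q
    · rw [if_pos h]
      by_cases hesc : c.getD j ' ' = '\\' ∧ j + 1 < c.length
      · rw [if_pos hesc]; exact ih c q _ (j + 2) (by omega)
      · rw [if_neg hesc]; exact ih c q _ (j + 1) (by omega)
    · rw [if_neg h]
      by_cases hn : j < c.length
      · rw [if_pos hn]; omega
      · rw [if_neg hn]; exact hj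

-- proof helper: finalize the fold state the way pvSegments does
def pvFinal (st : List (List Char × Option Char) × List Char × Option (Char × Bool)) :
    List (List Char × Option Char) := st.1 ++ [(st.2.1, none)]

theorem pvSegStep_str (evs : List (List Char × Option Char)) (b : List Char) (q : Char)
    (esc : Bool) (ch : Char) :
    pvSegStep (evs, b, some (q, esc)) ch
      = (evs, b ++ [ch],
         if esc = true then some (q, false)
         else if ch = '\\' then some (q, true)
         else if ch = q then none
         else some (q, false)) := rfl

theorem pvSegStep_none (evs : List (List Char × Option Char)) (b : List Char) (ch : Char) :
    pvSegStep (evs, b, none) ch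
      = (if ch = '"' ∨ ch = '\'' ∨ ch = '`' then (evs, b ++ [ch], some (ch, false))
         else if ch = '{' ∨ ch = '}' ∨ ch = ';' ∨ ch = '\n' then (evs ++ [(b, some ch)], [], none)
         else (evs, b ++ [ch], none)) := rfl

-- the event list accumulates by appending
theorem pvSeg_append : ∀ (l : List Char) (e0 e1 : List (List Char × Option Char))
    (b : List Char) (m : Option (Char × Bool)),
    List.foldl pvSegStep (e0 ++ e1, b, m) l
      = (e0 ++ (List.foldl pvSegStep (e1, b, m) l).1,
         (List.foldl pvSegStep (e1, b, m) l).2) := by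
  intro l
  induction l with
  | nil => intros; simp
  | cons ch l ih =>
    intro e0 e1 b m
    cases m with
    | some p =>
      obtain ⟨q, esc⟩ := p
      simp only [List.foldl_cons, pvSegStep]
      exact ih e0 e1 (b ++ [ch]) _
    | none =>
      simp only [List.foldl_cons, pvSegStep]
      by_cases h1 : ch = '"' ∨ ch = '\'' ∨ ch = '`'
      · rw [if_pos h1, if_pos h1]; exact ih e0 e1 (b ++ [ch]) _
      · rw [if_neg h1, if_neg h1]
        by_cases h2 : ch = '{' ∨ ch = '}' ∨ ch = ';' ∨ ch = '\n'
        · rw [if_pos h2, if_pos h2, List.append_assoc]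
          exact ih e0 (e1 ++ [(b, some ch)]) [] none
        · rw [if_neg h2, if_neg h2]; exact ih e0 e1 (b ++ [ch]) none

-- the line list of B's second pass accumulates by appending
theorem pvStepB_append : ∀ (evs : List (List Char × Option Char)) (ls : List (List Char)) (d : Int),
    List.foldl pvStepB (ls, d) evs
      = (ls ++ (List.foldl pvStepB ([], d) evs).1, (List.foldl pvStepB ([], d) evs).2) := by
  intro evs
  induction evs with
  | nil => intros; simp
  | cons e evs ih =>
    intro ls d
    simp only [List.foldl_cons, pvStepB, List.nil_append]
    rw [ih (ls ++ pvEventLines e.1 e.2 d) _, ih (pvEventLines e.1 e.2 d) _]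
    simp [List.append_assoc]

-- A's inner string scan = B's fold in string mode, up to the discarded final mode
theorem pv_str : ∀ (fuel : Nat) (c : List Char) (q : Char) (evs : List (List Char × Option Char))
    (buf : List Char) (j : Nat), q ≠ '\\' → j ≤ c.length → c.length - j < fuel →
    pvFinal (List.foldl pvSegStep (evs, buf, some (q, false)) (c.drop j))
      = pvFinal (List.foldl pvSegStep (evs, (pvInnerA fuel c q buf j).1, none)
          (c.drop (pvInnerA fuel c q buf j).2)) := by
  intro fuel
  induction fuel with
  | zero => intro c q evs buf j hq hj hk; omega
  | succ fuel ih =>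
    intro c q evs buf j hq hj hk
    simp only [pvInnerA]
    by_cases hn : j < c.length
    · have hdrop : c.drop j = c.getD j ' ' :: c.drop (j + 1) := by
        rw [List.drop_eq_getElem_cons hn, pv_getD_lt c j hn]
      by_cases hqj : c.getD j ' ' = q
      · -- closing quote
        rw [if_neg (fun h => h.2 hqj), if_pos hn, hdrop]
        have s1 : pvSegStep (evs, buf, some (q, false)) (c.getD j ' ')
            = (evs, buf ++ [c.getD j ' '], none) := by
          rw [pvSegStep_str, if_neg (by simp), if_neg (by rw [hqj]; exact hq), if_pos hqj]
        rw [List.foldl_cons, s1]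
      · rw [if_pos ⟨hn, hqj⟩]
        by_cases hesc : c.getD j ' ' = '\\' ∧ j + 1 < c.length
        · -- escape pair: two characters of the fold
          rw [if_pos hesc, hdrop]
          have hdrop2 : c.drop (j + 1) = c.getD (j + 1) ' ' :: c.drop (j + 2) := by
            rw [List.drop_eq_getElem_cons hesc.2, pv_getD_lt c (j + 1) hesc.2]
          rw [hdrop2]
          have s1 : pvSegStep (evs, buf, some (q, false)) (c.getD j ' ')
              = (evs, buf ++ [c.getD j ' '], some (q, true)) := by
            rw [pvSegStep_str, if_neg (by simp), if_pos hesc.1]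
          have s2 : pvSegStep (evs, buf ++ [c.getD j ' '], some (q, true)) (c.getD (j + 1) ' ')
              = (evs, buf ++ [c.getD j ' '] ++ [c.getD (j + 1) ' '], some (q, false)) := by
            rw [pvSegStep_str, if_pos rfl]
          rw [List.foldl_cons, s1, List.foldl_cons, s2]
          have hih := ih c q evs (buf ++ [c.getD j ' '] ++ [c.getD (j + 1) ' ']) (j + 2)
            hq (by omega) (by omega)
          rw [hih]
          simp [List.append_assoc]
        · rw [if_neg hesc]
          by_cases hbs : c.getD j ' ' = '\\'
          · -- backslash as last character of the input
            have hj1 : j + 1 = c.length := by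
              rcases Nat.lt_or_ge (j + 1) c.length with h | h
              · exact absurd ⟨hbs, h⟩ hesc
              · omega
            rw [hdrop]
            have s1 : pvSegStep (evs, buf, some (q, false)) (c.getD j ' ')
                = (evs, buf ++ [c.getD j ' '], some (q, true)) := by
              rw [pvSegStep_str, if_neg (by simp), if_pos hbs]
            rw [List.foldl_cons, s1]
            have hstep : pvInnerA fuel c q (buf ++ [c.getD j ' ']) (j + 1)
                = (buf ++ [c.getD j ' '], j + 1) := by
              cases fuel with
              | zero => rfl
              | succ fuel =>
                simp only [pvInnerA]
                rw [if_neg (fun h => absurd h.1 (by omega)), if_neg (by omega)]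
            rw [hstep]
            have hnil : c.drop (j + 1) = [] := List.drop_eq_nil_of_le (by omega)
            rw [hnil]
            simp [pvFinal]
          · -- ordinary character inside the string
            rw [hdrop]
            have s1 : pvSegStep (evs, buf, some (q, false)) (c.getD j ' ')
                = (evs, buf ++ [c.getD j ' '], some (q, false)) := by
              rw [pvSegStep_str, if_neg (by simp), if_neg hbs, if_neg hqj]
            rw [List.foldl_cons, s1]
            exact ih c q evs (buf ++ [c.getD j ' ']) (j + 1) hq (by omega) (by omega)
    · rw [if_neg (fun h => absurd h.1 hn), if_neg hn]
      have hj' : j = c.length := by omega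
      subst hj'
      simp [pvFinal]

-- the main simulation: A's interleaved machine = B's two passes over the rest of the input
theorem pv_main : ∀ (fuel : Nat) (c : List Char) (result : List (List Char)) (indent : Int)
    (buf : List Char) (i : Nat), i ≤ c.length → c.length - i < fuel →
    pvMainA fuel c result indent buf i
      = result ++ (List.foldl pvStepB ([], indent)
          (pvFinal (List.foldl pvSegStep ([], buf, none) (c.drop i)))).1 := by
  intro fuel
  induction fuel with
  | zero => intro c result indent buf i hi hk; omega
  | succ fuel ih =>
    intro c result indent buf i hi hk
    simp only [pvMainA]
    by_cases hn : i < c.length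
    · have hdrop : c.drop i = c.getD i ' ' :: c.drop (i + 1) := by
        rw [List.drop_eq_getElem_cons hn, pv_getD_lt c i hn]
      rw [if_pos hn, hdrop]
      by_cases hq : c.getD i ' ' = '"' ∨ c.getD i ' ' = '\'' ∨ c.getD i ' ' = '`'
      · -- string literal
        rw [if_pos hq]
        have hqb : c.getD i ' ' ≠ '\\' := by
          rcases hq with h | h | h <;> rw [h] <;> decide
        have s1 : pvSegStep (([], buf, none) :
              List (List Char × Option Char) × List Char × Option (Char × Bool)) (c.getD i ' ')
            = ([], buf ++ [c.getD i ' '], some (c.getD i ' ', false)) := by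
          rw [pvSegStep_none, if_pos hq]
        rw [List.foldl_cons, s1]
        rw [pv_str (c.length + 1) c (c.getD i ' ') [] (buf ++ [c.getD i ' ']) (i + 1)
          hqb (by omega) (by omega)]
        have hle := pvInnerA_le (c.length + 1) c (c.getD i ' ') (buf ++ [c.getD i ' ']) (i + 1)
          (by omega)
        exact ih c result indent _ _ hle (by
          have := pvInnerA_ge (c.length + 1) c (c.getD i ' ') (buf ++ [c.getD i ' ']) (i + 1)
          omega)
      · rw [if_neg hq]
        by_cases h1 : c.getD i ' ' = '{'
        · rw [if_pos h1]
          have s1 : pvSegStep (([], buf, none) :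
                List (List Char × Option Char) × List Char × Option (Char × Bool)) (c.getD i ' ')
              = ([(buf, some '{')], [], none) := by
            rw [pvSegStep_none, if_neg hq, if_pos (Or.inl h1), h1]
            simp
          rw [List.foldl_cons, s1,
            show ([(buf, some '{')] : List (List Char × Option Char))
              = [(buf, some '{')] ++ [] by simp,
            pvSeg_append]
          have hfin : pvFinal (([(buf, some '{')] ++
                (List.foldl pvSegStep ([], [], none) (c.drop (i + 1))).1,
                (List.foldl pvSegStep ([], [], none) (c.drop (i + 1))).2))
              = (buf, some '{') :: pvFinal (List.foldl pvSegStep ([], [], none) (c.drop (i + 1))) := by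
            simp [pvFinal]
          rw [hfin, List.foldl_cons]
          have hst : pvStepB ([], indent) (buf, some '{')
              = ([pvIndent indent ++ PySem.Chars.strip (buf ++ ['{'])], indent + 1) := by
            simp [pvStepB, pvEventLines]
          rw [hst, pvStepB_append,
            ih c (result ++ [pvIndent indent ++ PySem.Chars.strip (buf ++ [c.getD i ' '])])
              (indent + 1) [] (i + 1) (by omega) (by omega), h1]
          simp [List.append_assoc]
        · rw [if_neg h1]
          by_cases h2 : c.getD i ' ' = '}'
          · rw [if_pos h2]
            have s1 : pvSegStep (([], buf, none) :
                  List (List Char × Option Char) × List Char × Option (Char × Bool)) (c.getD i ' ')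
                = ([(buf, some '}')], [], none) := by
              rw [pvSegStep_none, if_neg hq, if_pos (Or.inr (Or.inl h2)), h2]
              simp
            rw [List.foldl_cons, s1,
              show ([(buf, some '}')] : List (List Char × Option Char))
                = [(buf, some '}')] ++ [] by simp,
              pvSeg_append]
            have hfin : pvFinal (([(buf, some '}')] ++
                  (List.foldl pvSegStep ([], [], none) (c.drop (i + 1))).1,
                  (List.foldl pvSegStep ([], [], none) (c.drop (i + 1))).2))
                = (buf, some '}') :: pvFinal (List.foldl pvSegStep ([], [], none) (c.drop (i + 1))) := by
              simp [pvFinal]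
            rw [hfin, List.foldl_cons]
            have hst : pvStepB ([], indent) (buf, some '}')
                = ((if PySem.Chars.strip buf ≠ [] then
                      [pvIndent indent ++ PySem.Chars.strip buf] else [])
                    ++ [pvIndent (max 0 (indent - 1)) ++ ['}']], max 0 (indent - 1)) := by
              simp [pvStepB, pvEventLines]
            rw [hst, pvStepB_append,
              ih c ((if buf ≠ [] ∧ PySem.Chars.strip buf ≠ [] then
                      result ++ [pvIndent indent ++ PySem.Chars.strip buf] else result)
                    ++ [pvIndent (max 0 (indent - 1)) ++ ['}']])
                (max 0 (indent - 1)) [] (i + 1) (by omega) (by omega), pv_flush_eq]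
            simp [List.append_assoc]
          · rw [if_neg h2]
            by_cases h3 : c.getD i ' ' = ';'
            · rw [if_pos h3]
              have s1 : pvSegStep (([], buf, none) :
                    List (List Char × Option Char) × List Char × Option (Char × Bool)) (c.getD i ' ')
                  = ([(buf, some ';')], [], none) := by
                rw [pvSegStep_none, if_neg hq, if_pos (Or.inr (Or.inr (Or.inl h3))), h3]
                simp
              rw [List.foldl_cons, s1,
                show ([(buf, some ';')] : List (List Char × Option Char))
                  = [(buf, some ';')] ++ [] by simp,
                pvSeg_append]
              have hfin : pvFinal (([(buf, some ';')] ++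
                    (List.foldl pvSegStep ([], [], none) (c.drop (i + 1))).1,
                    (List.foldl pvSegStep ([], [], none) (c.drop (i + 1))).2))
                  = (buf, some ';') :: pvFinal (List.foldl pvSegStep ([], [], none) (c.drop (i + 1))) := by
                simp [pvFinal]
              rw [hfin, List.foldl_cons]
              have hst : pvStepB ([], indent) (buf, some ';')
                  = ([pvIndent indent ++ PySem.Chars.strip (buf ++ [';'])], indent) := by
                simp [pvStepB, pvEventLines]
              rw [hst, pvStepB_append,
                ih c (result ++ [pvIndent indent ++ PySem.Chars.strip (buf ++ [c.getD i ' '])])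
                  indent [] (i + 1) (by omega) (by omega), h3]
              simp [List.append_assoc]
            · rw [if_neg h3]
              by_cases h4 : c.getD i ' ' = '\n'
              · rw [if_pos h4]
                have s1 : pvSegStep (([], buf, none) :
                      List (List Char × Option Char) × List Char × Option (Char × Bool)) (c.getD i ' ')
                    = ([(buf, some '\n')], [], none) := by
                  rw [pvSegStep_none, if_neg hq, if_pos (Or.inr (Or.inr (Or.inr h4))), h4]
                  simp
                rw [List.foldl_cons, s1,
                  show ([(buf, some '\n')] : List (List Char × Option Char))
                    = [(buf, some '\n')] ++ [] by simp,
                  pvSeg_append]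
                have hfin : pvFinal (([(buf, some '\n')] ++
                      (List.foldl pvSegStep ([], [], none) (c.drop (i + 1))).1,
                      (List.foldl pvSegStep ([], [], none) (c.drop (i + 1))).2))
                    = (buf, some '\n') :: pvFinal (List.foldl pvSegStep ([], [], none) (c.drop (i + 1))) := by
                  simp [pvFinal]
                rw [hfin, List.foldl_cons]
                have hst : pvStepB ([], indent) (buf, some '\n')
                    = (if PySem.Chars.strip buf ≠ [] then
                        [pvIndent indent ++ PySem.Chars.strip buf] else [], indent) := by
                  simp [pvStepB, pvEventLines]
                rw [hst, pvStepB_append,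
                  ih c (if buf ≠ [] ∧ PySem.Chars.strip buf ≠ [] then
                        result ++ [pvIndent indent ++ PySem.Chars.strip buf] else result)
                    indent [] (i + 1) (by omega) (by omega), pv_flush_eq]
                simp [List.append_assoc]
              · have hterm : ¬ (c.getD i ' ' = '{' ∨ c.getD i ' ' = '}' ∨
                    c.getD i ' ' = ';' ∨ c.getD i ' ' = '\n') :=
                  fun h => Or.elim h h1 (fun h' => Or.elim h' h2 (fun h'' => Or.elim h'' h3 h4))
                rw [if_neg h4]
                have s1 : pvSegStep (([], buf, none) :
                      List (List Char × Option Char) × List Char × Option (Char × Bool)) (c.getD i ' ')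
                    = ([], buf ++ [c.getD i ' '], none) := by
                  rw [pvSegStep_none, if_neg hq, if_neg hterm]
                rw [List.foldl_cons, s1]
                exact ih c result indent (buf ++ [c.getD i ' ']) (i + 1) (by omega) (by omega)
    · rw [if_neg hn]
      have hi' : i = c.length := by omega
      subst hi'
      rw [List.drop_length, List.foldl_nil]
      have hfin : pvFinal (([], buf, none) :
          List (List Char × Option Char) × List Char × Option (Char × Bool)) = [(buf, none)] := rfl
      rw [hfin, List.foldl_cons, List.foldl_nil]
      have hev : pvEventLines buf none indent
          = (if PySem.Chars.strip buf ≠ [] then [pvIndent indent ++ PySem.Chars.strip buf] else []) := by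
        simp [pvEventLines]
      rw [pv_flush_eq]
      simp [pvStepB, hev]

-- ===== VERDICT (by name: the statement is the Claim_ definition above) =====
theorem try_beautify_spec : Claim_equal_try_beautify := by
  intro content _
  unfold Spec_try_beautify try_beautify try_beautify_alt
  have h := pv_main (content.toList.length + 1) content.toList [] 0 [] 0 (by omega) (by omega)
  simp only [List.drop_zero, List.nil_append] at h
  rw [h]
  rfl
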